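-- pv_equiv track=rewrite | github.com/showkeyjar/Mustard | scripts/team_conductor.py | _classify_delivery_paths
-- ===== SOURCE A (Python) =====
-- def _classify_delivery_paths(paths: list[str]) -> dict[str, list[str]]:
--     groups = {"core": [], "artifacts": [], "volatile": [], "other": []}
--
--     for raw_path in paths:
--         path = raw_path.replace("\\", "/").strip()
--         if not path:
--             continue
--
--         if (
--             path.startswith("scripts/")
--             or path.startswith("tests/")
--             or path == "configs/team_cycle.json"
--             or path == "configs/real_prompt_eval.json"
--             or path == "configs/team_github.json"
--             or path.startswith("docs/plans/")
--         ):
--             groups["core"].append(path)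
--         elif (
--             path.startswith("data/team/")
--             or path.startswith("data/evolution/")
--             or path.endswith(".jsonl")
--         ):
--             groups["volatile"].append(path)
--         elif (
--             path.startswith("backlog/")
--             or path.startswith("memory/daily/")
--             or path == "data/eval/real_prompt_eval_latest.json"
--             or path.startswith("team/")
--         ):
--             groups["artifacts"].append(path)
--         elif path.startswith("docs/"):
--             groups["core"].append(path)
--         else:
--             groups["other"].append(path)
--
--     return groups
-- ===== SOURCE B (Python) =====
-- _RULES = [
--     (lambda p: p.startswith("scripts/"), "core"),
--     (lambda p: p.startswith("tests/"), "core"),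
--     (lambda p: p == "configs/team_cycle.json", "core"),
--     (lambda p: p == "configs/real_prompt_eval.json", "core"),
--     (lambda p: p == "configs/team_github.json", "core"),
--     (lambda p: p.startswith("docs/plans/"), "core"),
--     (lambda p: p.startswith("data/team/"), "volatile"),
--     (lambda p: p.startswith("data/evolution/"), "volatile"),
--     (lambda p: p.endswith(".jsonl"), "volatile"),
--     (lambda p: p.startswith("backlog/"), "artifacts"),
--     (lambda p: p.startswith("memory/daily/"), "artifacts"),
--     (lambda p: p == "data/eval/real_prompt_eval_latest.json", "artifacts"),
--     (lambda p: p.startswith("team/"), "artifacts"),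
--     (lambda p: p.startswith("docs/"), "core"),
-- ]
--
--
-- def _classify(path: str) -> str:
--     return next((key for pred, key in _RULES if pred(path)), "other")
--
--
-- def _classify_delivery_paths(paths: list[str]) -> dict[str, list[str]]:
--     cleaned = [p for p in (raw.replace("\\", "/").strip() for raw in paths) if p]
--     return {
--         key: [p for p in cleaned if _classify(p) == key]
--         for key in ("core", "artifacts", "volatile", "other")
--     }
-- ===== Notes on version B (the rewrite author's own statement) =====
-- stated objective: alternative
-- what changed: Replaced the single loop with an inline if/elif chain appending into the dict by a data-driven design: an ordered (predicate, group) rule table with a first-match classifier, normalization done once in a comprehension, and the result dict built by one filtering comprehension per group key.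
import Mathlib
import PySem

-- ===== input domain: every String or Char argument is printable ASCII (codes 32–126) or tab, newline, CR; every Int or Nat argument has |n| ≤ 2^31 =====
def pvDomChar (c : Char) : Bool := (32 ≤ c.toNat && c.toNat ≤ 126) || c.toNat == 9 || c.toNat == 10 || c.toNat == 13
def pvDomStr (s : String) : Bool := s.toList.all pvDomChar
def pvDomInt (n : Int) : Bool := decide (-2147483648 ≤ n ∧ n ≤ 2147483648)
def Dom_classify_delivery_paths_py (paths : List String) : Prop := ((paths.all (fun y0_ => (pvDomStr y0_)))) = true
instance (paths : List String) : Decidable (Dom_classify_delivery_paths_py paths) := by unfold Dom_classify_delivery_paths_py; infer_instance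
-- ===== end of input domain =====

-- B replaces A's inline if/elif append loop by an ordered (predicate, group) rule table with a
-- first-match classifier and one filtering pass per group key (alternative decomposition, same output).

set_option maxHeartbeats 1000000


-- ===== PORT A =====
-- path = raw_path.replace("\\", "/").strip()
def pvNorm (raw : String) : String := PySem.Str.strip (PySem.Str.replace raw "\\" "/")

def classify_delivery_paths_py (paths : List String) : List (String × List String) :=
  (paths.foldl (fun groups raw_path =>
      let path := pvNorm raw_path
      if path = "" then groups
      else if PySem.Str.startswith path "scripts/"
              || PySem.Str.startswith path "tests/"
              || path == "configs/team_cycle.json"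
              || path == "configs/real_prompt_eval.json"
              || path == "configs/team_github.json"
              || PySem.Str.startswith path "docs/plans/" then
        groups.modify "core" [] (· ++ [path])
      else if PySem.Str.startswith path "data/team/"
              || PySem.Str.startswith path "data/evolution/"
              || PySem.Str.endswith path ".jsonl" then
        groups.modify "volatile" [] (· ++ [path])
      else if PySem.Str.startswith path "backlog/"
              || PySem.Str.startswith path "memory/daily/"
              || path == "data/eval/real_prompt_eval_latest.json"
              || PySem.Str.startswith path "team/" then
        groups.modify "artifacts" [] (· ++ [path])
      else if PySem.Str.startswith path "docs/" then
        groups.modify "core" [] (· ++ [path])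
      else
        groups.modify "other" [] (· ++ [path]))
    ((((PySem.Dict.empty.insert "core" []).insert "artifacts" []).insert "volatile" []).insert "other" ([] : List String))).items

-- ===== PORT B =====
-- B's ordered first-match rule table (predicate, group key)
def pvRules : List ((String → Bool) × String) :=
  [ (fun p => PySem.Str.startswith p "scripts/", "core")
  , (fun p => PySem.Str.startswith p "tests/", "core")
  , (fun p => p == "configs/team_cycle.json", "core")
  , (fun p => p == "configs/real_prompt_eval.json", "core")
  , (fun p => p == "configs/team_github.json", "core")
  , (fun p => PySem.Str.startswith p "docs/plans/", "core")
  , (fun p => PySem.Str.startswith p "data/team/", "volatile")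
  , (fun p => PySem.Str.startswith p "data/evolution/", "volatile")
  , (fun p => PySem.Str.endswith p ".jsonl", "volatile")
  , (fun p => PySem.Str.startswith p "backlog/", "artifacts")
  , (fun p => PySem.Str.startswith p "memory/daily/", "artifacts")
  , (fun p => p == "data/eval/real_prompt_eval_latest.json", "artifacts")
  , (fun p => PySem.Str.startswith p "team/", "artifacts")
  , (fun p => PySem.Str.startswith p "docs/", "core") ]

-- next((key for pred, key in _RULES if pred(path)), "other"): first matching rule's key, else "other"
def pvFirstMatch (rules : List ((String → Bool) × String)) (path : String) : String :=
  match rules with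
  | [] => "other"
  | r :: rest => if r.1 path then r.2 else pvFirstMatch rest path

def pvClassify (path : String) : String := pvFirstMatch pvRules path

def classify_delivery_paths_py_alt (paths : List String) : List (String × List String) :=
  let cleaned := (paths.map pvNorm).filter (fun p => !(p == ""))
  ["core", "artifacts", "volatile", "other"].map
    (fun key => (key, cleaned.filter (fun p => pvClassify p == key)))

-- ===== PRECONDITION & SPEC =====
def Spec_classify_delivery_paths_py (paths : List String) (out : List (String × List String)) : Prop := out = classify_delivery_paths_py_alt paths
instance (paths : List String) (out : List (String × List String)) : Decidable (Spec_classify_delivery_paths_py paths out) := by unfold Spec_classify_delivery_paths_py; infer_instance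

-- ===== CLAIM (what is proved, stated in full; the proofs are below) =====
def Claim_equal_classify_delivery_paths_py : Prop := ∀ (paths : List String), Dom_classify_delivery_paths_py paths → Spec_classify_delivery_paths_py paths (classify_delivery_paths_py paths)

-- ===== LEMMAS AND PROOFS =====

-- the list B computes for one group key
def pvSel (key : String) (paths : List String) : List String :=
  (((paths.map pvNorm).filter (fun p => !(p == ""))).filter (fun p => pvClassify p == key))

theorem pvSel_cons (key : String) (x : String) (l : List String) :
    pvSel key (x :: l) =
      (if ¬ pvNorm x = "" ∧ pvClassify (pvNorm x) = key then [pvNorm x] else []) ++ pvSel key l := by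
  simp only [pvSel, List.map_cons, List.filter_cons]
  by_cases h1 : pvNorm x = "" <;> by_cases h2 : pvClassify (pvNorm x) = key <;>
    simp [h1, h2]

-- A's loop body, named for the proofs
def pvStep (groups : PySem.Dict String (List String)) (raw_path : String) :
    PySem.Dict String (List String) :=
  let path := pvNorm raw_path
  if path = "" then groups
  else if PySem.Str.startswith path "scripts/"
          || PySem.Str.startswith path "tests/"
          || path == "configs/team_cycle.json"
          || path == "configs/real_prompt_eval.json"
          || path == "configs/team_github.json"
          || PySem.Str.startswith path "docs/plans/" then
    groups.modify "core" [] (· ++ [path])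
  else if PySem.Str.startswith path "data/team/"
          || PySem.Str.startswith path "data/evolution/"
          || PySem.Str.endswith path ".jsonl" then
    groups.modify "volatile" [] (· ++ [path])
  else if PySem.Str.startswith path "backlog/"
          || PySem.Str.startswith path "memory/daily/"
          || path == "data/eval/real_prompt_eval_latest.json"
          || PySem.Str.startswith path "team/" then
    groups.modify "artifacts" [] (· ++ [path])
  else if PySem.Str.startswith path "docs/" then
    groups.modify "core" [] (· ++ [path])
  else
    groups.modify "other" [] (· ++ [path])

theorem pvCls_core1 (p : String)
    (h : (PySem.Str.startswith p "scripts/" || PySem.Str.startswith p "tests/"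
          || p == "configs/team_cycle.json" || p == "configs/real_prompt_eval.json"
          || p == "configs/team_github.json" || PySem.Str.startswith p "docs/plans/") = true) :
    pvClassify p = "core" := by
  unfold pvClassify pvRules
  simp only [Bool.or_eq_true] at h
  simp only [pvFirstMatch]
  rcases h with ((((h|h)|h)|h)|h)|h <;> simp [h] <;> (intros; simp_all)

theorem pvCls_volatile (p : String)
    (hb1 : ¬ (PySem.Str.startswith p "scripts/" || PySem.Str.startswith p "tests/"
          || p == "configs/team_cycle.json" || p == "configs/real_prompt_eval.json"
          || p == "configs/team_github.json" || PySem.Str.startswith p "docs/plans/") = true)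
    (h : (PySem.Str.startswith p "data/team/" || PySem.Str.startswith p "data/evolution/"
          || PySem.Str.endswith p ".jsonl") = true) :
    pvClassify p = "volatile" := by
  unfold pvClassify pvRules
  simp only [Bool.or_eq_true, not_or, Bool.not_eq_true] at hb1
  obtain ⟨⟨⟨⟨⟨h1,h2⟩,h3⟩,h4⟩,h5⟩,h6⟩ := hb1
  simp only [Bool.or_eq_true] at h
  simp only [pvFirstMatch, h1, h2, h3, h4, h5, h6]
  rcases h with (h|h)|h <;> simp [h] <;> (intros; simp_all)

theorem pvCls_artifacts (p : String)
    (hb1 : ¬ (PySem.Str.startswith p "scripts/" || PySem.Str.startswith p "tests/"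
          || p == "configs/team_cycle.json" || p == "configs/real_prompt_eval.json"
          || p == "configs/team_github.json" || PySem.Str.startswith p "docs/plans/") = true)
    (hb2 : ¬ (PySem.Str.startswith p "data/team/" || PySem.Str.startswith p "data/evolution/"
          || PySem.Str.endswith p ".jsonl") = true)
    (h : (PySem.Str.startswith p "backlog/" || PySem.Str.startswith p "memory/daily/"
          || p == "data/eval/real_prompt_eval_latest.json" || PySem.Str.startswith p "team/") = true) :
    pvClassify p = "artifacts" := by
  unfold pvClassify pvRules
  simp only [Bool.or_eq_true, not_or, Bool.not_eq_true] at hb1 hb2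
  obtain ⟨⟨⟨⟨⟨h1,h2⟩,h3⟩,h4⟩,h5⟩,h6⟩ := hb1
  obtain ⟨⟨h7,h8⟩,h9⟩ := hb2
  simp only [Bool.or_eq_true] at h
  simp only [pvFirstMatch, h1, h2, h3, h4, h5, h6, h7, h8, h9]
  rcases h with ((h|h)|h)|h <;> simp [h] <;> (intros; simp_all)

theorem pvCls_core2 (p : String)
    (hb1 : ¬ (PySem.Str.startswith p "scripts/" || PySem.Str.startswith p "tests/"
          || p == "configs/team_cycle.json" || p == "configs/real_prompt_eval.json"
          || p == "configs/team_github.json" || PySem.Str.startswith p "docs/plans/") = true)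
    (hb2 : ¬ (PySem.Str.startswith p "data/team/" || PySem.Str.startswith p "data/evolution/"
          || PySem.Str.endswith p ".jsonl") = true)
    (hb3 : ¬ (PySem.Str.startswith p "backlog/" || PySem.Str.startswith p "memory/daily/"
          || p == "data/eval/real_prompt_eval_latest.json" || PySem.Str.startswith p "team/") = true)
    (h : PySem.Str.startswith p "docs/" = true) :
    pvClassify p = "core" := by
  unfold pvClassify pvRules
  simp only [Bool.or_eq_true, not_or, Bool.not_eq_true] at hb1 hb2 hb3
  obtain ⟨⟨⟨⟨⟨h1,h2⟩,h3⟩,h4⟩,h5⟩,h6⟩ := hb1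
  obtain ⟨⟨h7,h8⟩,h9⟩ := hb2
  obtain ⟨⟨⟨h10,h11⟩,h12⟩,h13⟩ := hb3
  simp only [pvFirstMatch]
  simp_all

theorem pvCls_other (p : String)
    (hb1 : ¬ (PySem.Str.startswith p "scripts/" || PySem.Str.startswith p "tests/"
          || p == "configs/team_cycle.json" || p == "configs/real_prompt_eval.json"
          || p == "configs/team_github.json" || PySem.Str.startswith p "docs/plans/") = true)
    (hb2 : ¬ (PySem.Str.startswith p "data/team/" || PySem.Str.startswith p "data/evolution/"
          || PySem.Str.endswith p ".jsonl") = true)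
    (hb3 : ¬ (PySem.Str.startswith p "backlog/" || PySem.Str.startswith p "memory/daily/"
          || p == "data/eval/real_prompt_eval_latest.json" || PySem.Str.startswith p "team/") = true)
    (hb4 : ¬ PySem.Str.startswith p "docs/" = true) :
    pvClassify p = "other" := by
  unfold pvClassify pvRules
  simp only [Bool.or_eq_true, not_or, Bool.not_eq_true] at hb1 hb2 hb3 hb4
  obtain ⟨⟨⟨⟨⟨h1,h2⟩,h3⟩,h4⟩,h5⟩,h6⟩ := hb1
  obtain ⟨⟨h7,h8⟩,h9⟩ := hb2
  obtain ⟨⟨⟨h10,h11⟩,h12⟩,h13⟩ := hb3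
  simp only [pvFirstMatch]
  simp_all

theorem pvModify_core (c a v o : List String) (p : String) :
    (PySem.Dict.mk [("core",c),("artifacts",a),("volatile",v),("other",o)]).modify "core" [] (· ++ [p]) =
    PySem.Dict.mk [("core",c ++ [p]),("artifacts",a),("volatile",v),("other",o)] := by
  simp [PySem.Dict.modify, PySem.Dict.insert, PySem.Dict.getD, PySem.Dict.get?, PySem.Dict.contains]

theorem pvModify_artifacts (c a v o : List String) (p : String) :
    (PySem.Dict.mk [("core",c),("artifacts",a),("volatile",v),("other",o)]).modify "artifacts" [] (· ++ [p]) =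
    PySem.Dict.mk [("core",c),("artifacts",a ++ [p]),("volatile",v),("other",o)] := by
  simp [PySem.Dict.modify, PySem.Dict.insert, PySem.Dict.getD, PySem.Dict.get?, PySem.Dict.contains]

theorem pvModify_volatile (c a v o : List String) (p : String) :
    (PySem.Dict.mk [("core",c),("artifacts",a),("volatile",v),("other",o)]).modify "volatile" [] (· ++ [p]) =
    PySem.Dict.mk [("core",c),("artifacts",a),("volatile",v ++ [p]),("other",o)] := by
  simp [PySem.Dict.modify, PySem.Dict.insert, PySem.Dict.getD, PySem.Dict.get?, PySem.Dict.contains]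

theorem pvModify_other (c a v o : List String) (p : String) :
    (PySem.Dict.mk [("core",c),("artifacts",a),("volatile",v),("other",o)]).modify "other" [] (· ++ [p]) =
    PySem.Dict.mk [("core",c),("artifacts",a),("volatile",v),("other",o ++ [p])] := by
  simp [PySem.Dict.modify, PySem.Dict.insert, PySem.Dict.getD, PySem.Dict.get?, PySem.Dict.contains]

theorem pvLoop (l : List String) (c a v o : List String) :
    l.foldl pvStep (PySem.Dict.mk [("core",c),("artifacts",a),("volatile",v),("other",o)]) =
    PySem.Dict.mk [("core", c ++ pvSel "core" l), ("artifacts", a ++ pvSel "artifacts" l),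
                   ("volatile", v ++ pvSel "volatile" l), ("other", o ++ pvSel "other" l)] := by
  induction l generalizing c a v o with
  | nil => simp [pvSel]
  | cons x l ih =>
    rw [List.foldl_cons]
    by_cases h0 : pvNorm x = ""
    · have hstep : pvStep (PySem.Dict.mk [("core",c),("artifacts",a),("volatile",v),("other",o)]) x
          = PySem.Dict.mk [("core",c),("artifacts",a),("volatile",v),("other",o)] := by
        simp [pvStep, h0]
      rw [hstep, ih]
      simp [pvSel_cons, h0]
    · by_cases hb1 : (PySem.Str.startswith (pvNorm x) "scripts/"
          || PySem.Str.startswith (pvNorm x) "tests/"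
          || (pvNorm x) == "configs/team_cycle.json"
          || (pvNorm x) == "configs/real_prompt_eval.json"
          || (pvNorm x) == "configs/team_github.json"
          || PySem.Str.startswith (pvNorm x) "docs/plans/") = true
      · have hk := pvCls_core1 (pvNorm x) hb1
        have hstep : pvStep (PySem.Dict.mk [("core",c),("artifacts",a),("volatile",v),("other",o)]) x
            = PySem.Dict.mk [("core",c ++ [pvNorm x]),("artifacts",a),("volatile",v),("other",o)] := by
          rw [pvStep]; simp only [h0, if_false, hb1, if_true]; exact pvModify_core c a v o (pvNorm x)
        rw [hstep, ih]
        simp [pvSel_cons, h0, hk]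
      · by_cases hb2 : (PySem.Str.startswith (pvNorm x) "data/team/"
            || PySem.Str.startswith (pvNorm x) "data/evolution/"
            || PySem.Str.endswith (pvNorm x) ".jsonl") = true
        · have hk := pvCls_volatile (pvNorm x) hb1 hb2
          have hstep : pvStep (PySem.Dict.mk [("core",c),("artifacts",a),("volatile",v),("other",o)]) x
              = PySem.Dict.mk [("core",c),("artifacts",a),("volatile",v ++ [pvNorm x]),("other",o)] := by
            rw [pvStep]; simp only [h0, if_false, hb1, hb2, if_true]
            exact pvModify_volatile c a v o (pvNorm x)
          rw [hstep, ih]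
          simp [pvSel_cons, h0, hk]
        · by_cases hb3 : (PySem.Str.startswith (pvNorm x) "backlog/"
              || PySem.Str.startswith (pvNorm x) "memory/daily/"
              || (pvNorm x) == "data/eval/real_prompt_eval_latest.json"
              || PySem.Str.startswith (pvNorm x) "team/") = true
          · have hk := pvCls_artifacts (pvNorm x) hb1 hb2 hb3
            have hstep : pvStep (PySem.Dict.mk [("core",c),("artifacts",a),("volatile",v),("other",o)]) x
                = PySem.Dict.mk [("core",c),("artifacts",a ++ [pvNorm x]),("volatile",v),("other",o)] := by
              rw [pvStep]; simp only [h0, if_false, hb1, hb2, hb3, if_true]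
              exact pvModify_artifacts c a v o (pvNorm x)
            rw [hstep, ih]
            simp [pvSel_cons, h0, hk]
          · by_cases hb4 : PySem.Str.startswith (pvNorm x) "docs/" = true
            · have hk := pvCls_core2 (pvNorm x) hb1 hb2 hb3 hb4
              have hstep : pvStep (PySem.Dict.mk [("core",c),("artifacts",a),("volatile",v),("other",o)]) x
                  = PySem.Dict.mk [("core",c ++ [pvNorm x]),("artifacts",a),("volatile",v),("other",o)] := by
                rw [pvStep]; simp only [h0, if_false, hb1, hb2, hb3, hb4]
                exact pvModify_core c a v o (pvNorm x)
              rw [hstep, ih]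
              simp [pvSel_cons, h0, hk]
            · have hk := pvCls_other (pvNorm x) hb1 hb2 hb3 hb4
              have hstep : pvStep (PySem.Dict.mk [("core",c),("artifacts",a),("volatile",v),("other",o)]) x
                  = PySem.Dict.mk [("core",c),("artifacts",a),("volatile",v),("other",o ++ [pvNorm x])] := by
                rw [pvStep]; simp only [h0, if_false, hb1, hb2, hb3, hb4]
                exact pvModify_other c a v o (pvNorm x)
              rw [hstep, ih]
              simp [pvSel_cons, h0, hk]

-- ===== VERDICT (by name: the statement is the Claim_ definition above) =====
theorem classify_delivery_paths_py_spec : Claim_equal_classify_delivery_paths_py := by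
  intro paths _
  unfold Spec_classify_delivery_paths_py classify_delivery_paths_py classify_delivery_paths_py_alt
  have hinit : (((PySem.Dict.empty.insert "core" []).insert "artifacts" []).insert "volatile" []).insert "other" ([] : List String)
      = PySem.Dict.mk [("core",([]:List String)),("artifacts",[]),("volatile",[]),("other",[])] := by
    decide
  have hmain : paths.foldl pvStep ((((PySem.Dict.empty.insert "core" []).insert "artifacts" []).insert "volatile" []).insert "other" ([] : List String))
      = PySem.Dict.mk [("core", pvSel "core" paths), ("artifacts", pvSel "artifacts" paths),
                       ("volatile", pvSel "volatile" paths), ("other", pvSel "other" paths)] := by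
    rw [hinit, pvLoop]; simp
  have hfold : paths.foldl (fun groups raw_path =>
      let path := pvNorm raw_path
      if path = "" then groups
      else if PySem.Str.startswith path "scripts/"
              || PySem.Str.startswith path "tests/"
              || path == "configs/team_cycle.json"
              || path == "configs/real_prompt_eval.json"
              || path == "configs/team_github.json"
              || PySem.Str.startswith path "docs/plans/" then
        groups.modify "core" [] (· ++ [path])
      else if PySem.Str.startswith path "data/team/"
              || PySem.Str.startswith path "data/evolution/"
              || PySem.Str.endswith path ".jsonl" then
        groups.modify "volatile" [] (· ++ [path])
      else if PySem.Str.startswith path "backlog/"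
              || PySem.Str.startswith path "memory/daily/"
              || path == "data/eval/real_prompt_eval_latest.json"
              || PySem.Str.startswith path "team/" then
        groups.modify "artifacts" [] (· ++ [path])
      else if PySem.Str.startswith path "docs/" then
        groups.modify "core" [] (· ++ [path])
      else
        groups.modify "other" [] (· ++ [path]))
      ((((PySem.Dict.empty.insert "core" []).insert "artifacts" []).insert "volatile" []).insert "other" ([] : List String))
      = paths.foldl pvStep ((((PySem.Dict.empty.insert "core" []).insert "artifacts" []).insert "volatile" []).insert "other" ([] : List String)) := rfl
  rw [hfold, hmain]
  simp [pvSel, List.map]
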